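-- pv_equiv track=rewrite | github.com/irtaza780/technical_debt_findings | refactored_code_v3/DouDizhuPoker_DefaultOrganization_20250915221401/rules.py | _find_consecutive_run
-- ===== SOURCE A (Python) =====
-- from typing import List, Dict, Optional
--
-- def _is_consecutive(ranks: List[int]) -> bool:
--     """
--     Check if a sorted list of ranks forms a consecutive sequence.
--
--     Args:
--         ranks: Sorted list of integer ranks.
--
--     Returns:
--         True if ranks are consecutive, False otherwise.
--     """
--     return all(b == a + 1 for a, b in zip(ranks, ranks[1:]))
--
-- def _find_consecutive_run(values: List[int], target_length: int) -> Optional[List[int]]: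
--     """
--     Find the first consecutive run of exact length from a sorted list of values.
--
--     Args:
--         values: Sorted list of integer values.
--         target_length: The desired length of the consecutive run.
--
--     Returns:
--         A list of consecutive values of target_length, or None if not found.
--     """
--     if len(values) < target_length:
--         return None
--
--     # Sliding window to find consecutive run
--     for i in range(len(values) - target_length + 1):
--         window = values[i:i + target_length]
--         if _is_consecutive(window):
--             return window
--
--     return None
-- ===== SOURCE B (Python) =====
-- from typing import List, Optional
--
-- def _find_consecutive_run(values: List[int], target_length: int) -> Optional[List[int]]:
--     """Single left-to-right pass tracking the length of the current consecutive
--     run; returns the first run slice that reaches target_length."""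
--     if target_length <= 0:
--         return []
--     run = 0
--     prev = None
--     for j, v in enumerate(values):
--         run = run + 1 if run and v == prev + 1 else 1
--         prev = v
--         if run >= target_length:
--             return values[j - target_length + 1 : j + 1]
--     return None
-- ===== Notes on version B (the rewrite author's own statement) =====
-- stated objective: faster
-- what changed: Replaced the sliding-window scan that re-slices and re-checks a fresh window of length L at every position (O(n*L)) by a single left-to-right pass that maintains the length of the current consecutive run and returns as soon as it reaches the target (O(n)).
-- intended difference: For a negative target_length, Python's negative-slice wraparound makes A check windows of length len(values)+target_length and return the first such consecutive block (e.g. A([-3,0],-1) = [-3]); B returns [] there, the only sensible 'run of non-positive length', so D_ is: target_length < 0 and some window of length len+target_length starting before -target_length is consecutive. — e.g. on _find_consecutive_run([-3, 0], -1): A returns some [-3], B returns some []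
import Mathlib
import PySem

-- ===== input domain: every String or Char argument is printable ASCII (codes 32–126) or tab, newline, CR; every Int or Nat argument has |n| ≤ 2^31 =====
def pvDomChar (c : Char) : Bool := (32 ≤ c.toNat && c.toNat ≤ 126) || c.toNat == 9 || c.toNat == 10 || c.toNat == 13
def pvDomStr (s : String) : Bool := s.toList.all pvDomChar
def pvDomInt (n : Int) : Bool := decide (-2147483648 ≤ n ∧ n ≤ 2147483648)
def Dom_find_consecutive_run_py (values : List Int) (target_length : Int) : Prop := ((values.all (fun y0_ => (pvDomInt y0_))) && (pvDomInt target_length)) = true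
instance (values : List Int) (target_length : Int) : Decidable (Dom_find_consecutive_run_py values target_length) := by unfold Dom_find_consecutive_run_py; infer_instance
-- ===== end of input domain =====

-- B replaces A's re-sliced sliding-window check (O(n·L) work) by one pass tracking the current
-- consecutive-run length; on negative target_length (see D_ below) B returns [] where
-- A's negative-slice wraparound may return an accidental non-empty block.

-- ===== PORT A =====
def is_consecutive_py (ranks : List Int) : Bool :=
  (ranks.zip (PySem.List.slice ranks (some 1) none)).all (fun p => p.2 == p.1 + 1)

def findLoopA (values : List Int) (t : Int) : Nat → Int → Option (List Int)
  | 0, _ => none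
  | n + 1, i =>
    let window := PySem.List.slice values (some i) (some (i + t))
    if is_consecutive_py window then some window else findLoopA values t n (i + 1)

def find_consecutive_run_py (values : List Int) (target_length : Int) : Option (List Int) :=
  if (values.length : Int) < target_length then none
  else findLoopA values target_length
    ((values.length : Int) - target_length + 1).toNat 0

-- ===== PORT B =====
def findLoopB (values : List Int) (t : Int) : Nat → Int → Int → List Int → Option (List Int)
  | _, _, _, [] => none
  | j, run, prev, v :: rest =>
    let run' := if run ≠ 0 ∧ v = prev + 1 then run + 1 else 1
    if t ≤ run' then
      some (PySem.List.slice values (some ((j : Int) - t + 1)) (some ((j : Int) + 1)))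
    else findLoopB values t (j + 1) run' v rest

def find_consecutive_run_py_alt (values : List Int) (target_length : Int) : Option (List Int) :=
  if target_length ≤ 0 then some []
  else findLoopB values target_length 0 0 0 values

-- ===== PRECONDITION & SPEC =====
-- For negative target_length A's slice values[i:i+t] wraps around and becomes a window of
-- length len(values)+t; A returns the first such consecutive block (non-empty), while B
-- returns [], the intended result for a non-positive target length.
def D_find_consecutive_run_py (values : List Int) (target_length : Int) : Prop :=
  target_length < 0 ∧ 0 < values.length + target_length ∧
    ∃ i < target_length.natAbs,
      List.IsChain (fun a b : Int => b = a + 1)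
        ((values.drop i).take (values.length + target_length).toNat)
instance (values : List Int) (target_length : Int) : Decidable (D_find_consecutive_run_py values target_length) := by
  unfold D_find_consecutive_run_py; infer_instance

def Spec_find_consecutive_run_py (values : List Int) (target_length : Int) (out : Option (List Int)) : Prop := ¬ D_find_consecutive_run_py values target_length → out = find_consecutive_run_py_alt values target_length
instance (values : List Int) (target_length : Int) (out : Option (List Int)) : Decidable (Spec_find_consecutive_run_py values target_length out) := by unfold Spec_find_consecutive_run_py; infer_instance

def pvDiffWitness_find_consecutive_run_py : List Int × Int := ([-3, 0], -1)
def pvDiffWitnessOut_find_consecutive_run_py : (Option (List Int)) × (Option (List Int)) := (some [-3], some [])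

-- ===== CLAIM (what is proved, stated in full; the proofs are below) =====
def Claim_unchanged_find_consecutive_run_py : Prop := ∀ (values : List Int) (target_length : Int), Dom_find_consecutive_run_py values target_length → Spec_find_consecutive_run_py values target_length (find_consecutive_run_py values target_length)
def Claim_changed_find_consecutive_run_py : Prop := Dom_find_consecutive_run_py (pvDiffWitness_find_consecutive_run_py.1) (pvDiffWitness_find_consecutive_run_py.2) ∧ D_find_consecutive_run_py (pvDiffWitness_find_consecutive_run_py.1) (pvDiffWitness_find_consecutive_run_py.2) ∧ find_consecutive_run_py (pvDiffWitness_find_consecutive_run_py.1) (pvDiffWitness_find_consecutive_run_py.2) = pvDiffWitnessOut_find_consecutive_run_py.1 ∧ find_consecutive_run_py_alt (pvDiffWitness_find_consecutive_run_py.1) (pvDiffWitness_find_consecutive_run_py.2) = pvDiffWitnessOut_find_consecutive_run_py.2 ∧ pvDiffWitnessOut_find_consecutive_run_py.1 ≠ pvDiffWitnessOut_find_consecutive_run_py.2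
def Claim_exact_find_consecutive_run_py : Prop := ∀ (values : List Int) (target_length : Int), Dom_find_consecutive_run_py values target_length → D_find_consecutive_run_py values target_length → find_consecutive_run_py values target_length ≠ find_consecutive_run_py_alt values target_length

-- ===== LEMMAS AND PROOFS =====

-- window predicate: the s-long block of values starting at i steps by +1
def Wb (v : List Int) (i s : Nat) : Prop :=
  ∀ m : Nat, m + 1 < s → v.getD (i + m + 1) 0 = v.getD (i + m) 0 + 1

-- length of the maximal consecutive run ending at index j
def streak (v : List Int) : Nat → Nat
  | 0 => 1
  | j + 1 => if v.getD (j + 1) 0 = v.getD j 0 + 1 then streak v j + 1 else 1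

theorem streak_pos (v : List Int) (j : Nat) : 1 ≤ streak v j := by
  cases j with
  | zero => simp [streak]
  | succ j => simp only [streak]; split <;> omega

theorem streak_le (v : List Int) (j : Nat) : streak v j ≤ j + 1 := by
  induction j with
  | zero => simp [streak]
  | succ j ih => simp only [streak]; split <;> omega

theorem streak_ge_iff (v : List Int) : ∀ (j s : Nat), 1 ≤ s →
    (s ≤ streak v j ↔ s ≤ j + 1 ∧ Wb v (j + 1 - s) s) := by
  intro j
  induction j with
  | zero =>
    intro s hs
    simp only [streak]
    constructor
    · intro h
      refine ⟨by omega, fun m hm => by omega⟩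
    · rintro ⟨h1, _⟩; omega
  | succ j ih =>
    intro s hs
    by_cases hs1 : s = 1
    · subst hs1
      refine ⟨fun _ => ⟨by omega, fun m hm => by omega⟩, fun _ => streak_pos v (j+1)⟩
    have hs2 : 2 ≤ s := by omega
    simp only [streak]
    split
    · rename_i hstep
      have hrec : s ≤ streak v j + 1 ↔ s - 1 ≤ streak v j := by omega
      rw [hrec, ih (s-1) (by omega),
        show j + 1 - (s - 1) = j + 1 + 1 - s from by omega]
      constructor
      · rintro ⟨h1, h2⟩
        refine ⟨by omega, fun m hm => ?_⟩
        by_cases hm2 : m + 1 < s - 1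
        · exact h2 m hm2
        · have hm3 : m = s - 2 := by omega
          subst hm3
          have e1 : j + 1 + 1 - s + (s - 2) + 1 = j + 1 := by omega
          have e2 : j + 1 + 1 - s + (s - 2) = j := by omega
          rw [e1, e2]; exact hstep
      · rintro ⟨h1, h2⟩
        exact ⟨by omega, fun m hm => h2 m (by omega)⟩
    · rename_i hstep
      constructor
      · intro h; omega
      · rintro ⟨h1, h2⟩
        exfalso
        have := h2 (s - 2) (by omega)
        have e1 : j + 1 + 1 - s + (s - 2) + 1 = j + 1 := by omega
        have e2 : j + 1 + 1 - s + (s - 2) = j := by omega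
        rw [e1, e2] at this
        exact hstep this

theorem isConsec_cons₂ (a b : Int) (r : List Int) :
    is_consecutive_py (a :: b :: r) = ((b == a + 1) && is_consecutive_py (b :: r)) := by
  simp [is_consecutive_py, PySem.List.slice_from_one]

theorem isConsec_iff : ∀ l : List Int,
    is_consecutive_py l = true ↔ ∀ m : Nat, m + 1 < l.length → l.getD (m + 1) 0 = l.getD m 0 + 1 := by
  intro l
  induction l with
  | nil => simp [is_consecutive_py]
  | cons a tl ih =>
    cases tl with
    | nil => simp [is_consecutive_py, PySem.List.slice_from_one]
    | cons b r =>
      rw [isConsec_cons₂, Bool.and_eq_true, ih]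
      constructor
      · rintro ⟨h1, h2⟩ m hm
        cases m with
        | zero => simpa using h1
        | succ m => simpa using h2 m (by simpa using hm)
      · intro h
        refine ⟨by simpa using h 0 (by simp), fun m hm => ?_⟩
        simpa using h (m+1) (by simpa using hm)

theorem window_len (v : List Int) (i t' : Nat) (h : i + t' ≤ v.length) :
    ((v.drop i).take t').length = t' := by
  simp only [List.length_take, List.length_drop]; omega

theorem window_getD (v : List Int) (i t' m : Nat) (h : i + t' ≤ v.length) (hm : m < t') :
    ((v.drop i).take t').getD m 0 = v.getD (i + m) 0 := by
  have hlen : ((v.drop i).take t').length = t' := window_len v i t' h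
  rw [List.getD_eq_getElem _ _ (by omega), List.getD_eq_getElem _ _ (by omega)]
  simp [List.getElem_take, List.getElem_drop]

theorem bridge (v : List Int) (i t' : Nat) (h : i + t' ≤ v.length) :
    (is_consecutive_py ((v.drop i).take t') = true) ↔ Wb v i t' := by
  rw [isConsec_iff, window_len v i t' h]
  constructor
  · intro hc m hm
    have := hc m hm
    rw [window_getD v i t' (m+1) h (by omega), window_getD v i t' m h (by omega)] at this
    simpa [Nat.add_assoc] using this
  · intro hw m hm
    rw [window_getD v i t' (m+1) h (by omega), window_getD v i t' m h (by omega)]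
    have := hw m hm
    simpa [Nat.add_assoc] using this

theorem isChain_window_iff (v : List Int) (i c : Nat) (h : i + c ≤ v.length) :
    List.IsChain (fun a b : Int => b = a + 1) ((v.drop i).take c) ↔ Wb v i c := by
  rw [List.isChain_iff_getElem]
  constructor
  · intro hch m hm
    have hl : m + 1 < ((v.drop i).take c).length := by rw [window_len v i c h]; omega
    have := hch m hl
    simp only [List.getElem_take, List.getElem_drop] at this
    rw [List.getD_eq_getElem v 0 (by omega : i + m + 1 < v.length),
        List.getD_eq_getElem v 0 (by omega : i + m < v.length)]
    simpa [Nat.add_assoc] using this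
  · intro hw m hm
    rw [window_len v i c h] at hm
    simp only [List.getElem_take, List.getElem_drop]
    have := hw m (by omega)
    rw [List.getD_eq_getElem v 0 (by omega : i + m + 1 < v.length),
        List.getD_eq_getElem v 0 (by omega : i + m < v.length)] at this
    simpa [Nat.add_assoc] using this

theorem find?_range_some {p : Nat → Bool} : ∀ {n i : Nat},
    (List.range n).find? p = some i ↔ i < n ∧ p i = true ∧ ∀ j < i, p j = false := by
  intro n
  induction n with
  | zero => intro i; simp
  | succ n ih =>
    intro i
    rw [List.range_succ, List.find?_append]
    cases h : (List.range n).find? p with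
    | some j =>
      obtain ⟨hj1, hj2, hj3⟩ := ih.mp h
      simp only [Option.some_or, Option.some.injEq]
      constructor
      · rintro rfl; exact ⟨by omega, hj2, hj3⟩
      · rintro ⟨h1, h2, h3⟩
        rcases Nat.lt_trichotomy i j with hlt | rfl | hgt
        · exact absurd h2 (by simp [hj3 i hlt])
        · rfl
        · exact absurd hj2 (by simp [h3 j hgt])
    | none =>
      have hn := List.find?_eq_none.mp h
      simp only [Option.none_or]
      constructor
      · intro hf
        have : p n = true ∧ i = n := by
          by_cases hp : p n = true
          · refine ⟨hp, ?_⟩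
            simp [List.find?, hp] at hf
            omega
          · simp [List.find?, hp] at hf
        obtain ⟨hp, rfl⟩ := this
        exact ⟨by omega, hp, fun j hj => by
          have := hn j (by simp only [List.mem_range]; omega)
          simpa using this⟩
      · rintro ⟨h1, h2, h3⟩
        have : i = n := by
          by_contra hne
          have hi : i < n := by omega
          have := hn i (by simp [List.mem_range, hi])
          simp [h2] at this
        subst this
        simp [List.find?, h2]

-- A's counting loop is find?-then-map over the corresponding index range
theorem findLoopA_eq (v : List Int) (t : Int) : ∀ (n : Nat) (i : Int),
    findLoopA v t n i =
      (((PySem.List.pyRange i (i + (n : Int)) 1).find?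
          fun x => is_consecutive_py (PySem.List.slice v (some x) (some (x + t)))).map
        fun x => PySem.List.slice v (some x) (some (x + t))) := by
  intro n
  induction n with
  | zero =>
    intro i
    rw [PySem.List.pyRange_one_eq_nil (by omega)]
    rfl
  | succ n ih =>
    intro i
    rw [PySem.List.pyRange_one_cons (by omega), List.find?_cons]
    simp only [findLoopA]
    by_cases hp : is_consecutive_py (PySem.List.slice v (some i) (some (i + t))) = true
    · simp [hp]
    · simp only [Bool.not_eq_true] at hp
      simp only [hp, Bool.false_eq_true, if_false]
      rw [ih (i + 1), show i + 1 + (n : Int) = i + ((n + 1 : Nat) : Int) from by push_cast; ring]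

theorem findLoopA_eq' (v : List Int) (t K : Int) (hK : 0 ≤ K) :
    findLoopA v t K.toNat 0 =
      (((PySem.List.pyRange 0 K 1).find?
          fun x => is_consecutive_py (PySem.List.slice v (some x) (some (x + t)))).map
        fun x => PySem.List.slice v (some x) (some (x + t))) := by
  rw [findLoopA_eq v t K.toNat 0, show (0 : Int) + (K.toNat : Int) = K from by omega]

-- A, for positive target t' ≤ n, as a first-window search over List.range
theorem portA_char (v : List Int) (t' : Nat) (_ht : 1 ≤ t') (hn : t' ≤ v.length) :
    find_consecutive_run_py v (t' : Int) =
      (((List.range (v.length - t' + 1)).find? fun i => is_consecutive_py ((v.drop i).take t')).map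
        fun i => (v.drop i).take t') := by
  unfold find_consecutive_run_py
  rw [if_neg (by omega)]
  rw [findLoopA_eq' v (t' : Int) _ (by omega)]
  rw [show ((v.length : Int) - (t' : Int) + 1) = ((v.length - t' + 1 : Nat) : Int) from by omega]
  rw [PySem.List.pyRange_one]
  rw [show (((v.length - t' + 1 : Nat) : Int) - 0).toNat = v.length - t' + 1 from by omega]
  rw [List.find?_map, Option.map_map]
  simp only [Function.comp_def, zero_add, PySem.List.slice_natCast_add]

-- B's loop invariant: the result is the first j whose run length reaches the target
theorem findLoopB_eq (v : List Int) (t' : Nat) (ht : 1 ≤ t') :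
    ∀ (rest : List Int) (j : Nat) (run prev : Int),
      rest = v.drop j →
      ((j = 0 ∧ run = 0) ∨ (1 ≤ j ∧ run = ((streak v (j - 1) : Nat) : Int) ∧ prev = v.getD (j - 1) 0)) →
      (∀ j' < j, streak v j' < t') →
      findLoopB v (t' : Int) j run prev rest =
        (((List.range v.length).find? fun x => decide (t' ≤ streak v x)).map
          fun x => (v.drop (x + 1 - t')).take t') := by
  intro rest
  induction rest with
  | nil =>
    intro j run prev hdrop _ hmin
    have hn : v.length ≤ j := List.drop_eq_nil_iff.mp hdrop.symm
    have hnone : (List.range v.length).find? (fun x => decide (t' ≤ streak v x)) = none := by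
      rw [List.find?_eq_none]
      intro x hx
      simp only [List.mem_range] at hx
      simpa using Nat.not_le.mpr (hmin x (by omega))
    simp [findLoopB, hnone]
  | cons v₀ rest' ih =>
    intro j run prev hdrop hinv hmin
    have hj : j < v.length := by
      by_contra hge
      rw [List.drop_eq_nil_iff.mpr (by omega)] at hdrop
      simp at hdrop
    rw [List.drop_eq_getElem_cons hj] at hdrop
    injection hdrop with hv₀ hrest
    have hrun : (if run ≠ 0 ∧ v₀ = prev + 1 then run + 1 else 1) = ((streak v j : Nat) : Int) := by
      rcases hinv with ⟨rfl, rfl⟩ | ⟨hj1, hrun, hprev⟩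
      · rw [if_neg (by simp)]
        simp [streak]
      · obtain ⟨k, rfl⟩ : ∃ k, j = k + 1 := ⟨j - 1, by omega⟩
        simp only [Nat.add_sub_cancel] at hrun hprev
        have hk := streak_pos v k
        by_cases hstep : v.getD (k+1) 0 = v.getD k 0 + 1
        · rw [if_pos ⟨by omega, by
            rw [hv₀, hprev, ← List.getD_eq_getElem v 0 hj]; exact hstep⟩]
          simp only [streak, if_pos hstep]
          omega
        · rw [if_neg (by
            rintro ⟨-, hc⟩
            rw [hv₀, hprev, ← List.getD_eq_getElem v 0 hj] at hc
            exact hstep hc)]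
          have hone : streak v (k+1) = 1 := by simp only [streak, if_neg hstep]
          rw [hone]
          simp
    simp only [findLoopB]
    rw [hrun]
    by_cases hge : t' ≤ streak v j
    · rw [if_pos (by exact_mod_cast hge)]
      have hfind : (List.range v.length).find? (fun x => decide (t' ≤ streak v x)) = some j := by
        apply find?_range_some.mpr
        exact ⟨hj, by simpa using hge, fun x hx => by simpa using Nat.not_le.mpr (hmin x hx)⟩
      rw [hfind]
      have hsle : streak v j ≤ j + 1 := streak_le v j
      rw [show ((j : Int) - (t' : Int) + 1) = ((j + 1 - t' : Nat) : Int) from by omega,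
        show ((j : Int) + 1) = ((j + 1 : Nat) : Int) from by omega,
        PySem.List.slice_natCast,
        show j + 1 - (j + 1 - t') = t' from by omega]
      rfl
    · rw [if_neg (by exact_mod_cast hge)]
      apply ih (j + 1) _ _ hrest
      · right
        refine ⟨by omega, by simp, ?_⟩
        simp only [Nat.add_sub_cancel]
        rw [hv₀, List.getD_eq_getElem v 0 hj]
      · intro x hx
        rcases Nat.lt_or_ge x j with h | h
        · exact hmin x h
        · have : x = j := by omega
          subst this
          omega

-- the general slice for a nonnegative start and a wrapped (negative) stop inside range
theorem slice_neg_stop (v : List Int) (t : Int) (x : Nat) (ht : t < 0)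
    (hpos : 0 < (v.length : Int) + t) (hx : x < (-t).toNat) :
    PySem.List.slice v (some (x : Int)) (some ((x : Int) + t)) =
      (v.drop x).take (((v.length : Int) + t).toNat) := by
  have ha : PySem.List.clampIdx v.length (x : Int) = x := by
    simp only [PySem.List.clampIdx]
    rw [if_neg (by omega)]
    omega
  have hb : PySem.List.clampIdx v.length ((x : Int) + t) = ((v.length : Int) + t).toNat + x := by
    simp only [PySem.List.clampIdx]
    rw [if_pos (by omega), if_neg (by omega)]
    omega
  simp only [PySem.List.slice, ha, hb]
  rw [show ((v.length : Int) + t).toNat + x - x = ((v.length : Int) + t).toNat from by omega]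

theorem slice_empty_of_clamp_zero (v : List Int) (a b : Int)
    (h : PySem.List.clampIdx v.length b = 0) :
    PySem.List.slice v (some a) (some b) = [] := by
  simp [PySem.List.slice, h]

-- main positive-target equivalence
theorem main_pos (v : List Int) (t' : Nat) (ht : 1 ≤ t') :
    find_consecutive_run_py v (t' : Int) = find_consecutive_run_py_alt v (t' : Int) := by
  unfold find_consecutive_run_py_alt
  rw [if_neg (by omega)]
  rw [findLoopB_eq v t' ht v 0 0 0 rfl (Or.inl ⟨rfl, rfl⟩) (fun x hx => absurd hx (Nat.not_lt_zero x))]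
  by_cases hn : t' ≤ v.length
  · rw [portA_char v t' ht hn]
    cases hA : (List.range (v.length - t' + 1)).find? (fun i => is_consecutive_py ((v.drop i).take t')) with
    | some i =>
      obtain ⟨hi1, hi2, hi3⟩ := find?_range_some.mp hA
      have hW : Wb v i t' := (bridge v i t' (by omega)).mp hi2
      have hB : (List.range v.length).find? (fun x => decide (t' ≤ streak v x)) = some (i + t' - 1) := by
        apply find?_range_some.mpr
        refine ⟨by omega, ?_, ?_⟩
        · simp only [decide_eq_true_eq]
          apply (streak_ge_iff v (i + t' - 1) t' ht).mpr
          refine ⟨by omega, ?_⟩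
          rw [show i + t' - 1 + 1 - t' = i from by omega]
          exact hW
        · intro x hx
          simp only [decide_eq_false_iff_not]
          intro hle
          obtain ⟨hx1, hWx⟩ := (streak_ge_iff v x t' ht).mp hle
          have hlt : x + 1 - t' < i := by omega
          have := hi3 (x + 1 - t') hlt
          rw [← Bool.not_eq_true] at this
          exact this ((bridge v (x + 1 - t') t' (by omega)).mpr hWx)
      rw [hB]
      simp only [Option.map_some]
      rw [show i + t' - 1 + 1 - t' = i from by omega]
    | none =>
      have hAll := List.find?_eq_none.mp hA
      have hB : (List.range v.length).find? (fun x => decide (t' ≤ streak v x)) = none := by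
        rw [List.find?_eq_none]
        intro x hx
        simp only [List.mem_range] at hx
        simp only [decide_eq_true_eq]
        intro hle
        obtain ⟨hx1, hWx⟩ := (streak_ge_iff v x t' ht).mp hle
        have := hAll (x + 1 - t') (by simp only [List.mem_range]; omega)
        exact this ((bridge v (x + 1 - t') t' (by omega)).mpr hWx)
      rw [hB]
      rfl
  · unfold find_consecutive_run_py
    rw [if_pos (by omega)]
    have hB : (List.range v.length).find? (fun x => decide (t' ≤ streak v x)) = none := by
      rw [List.find?_eq_none]
      intro x hx
      simp only [List.mem_range] at hx
      have := streak_le v x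
      simpa using Nat.not_le.mpr (by omega)
    rw [hB]
    rfl

theorem main_nonpos (v : List Int) (t : Int) (ht : t ≤ 0)
    (hD : ¬ D_find_consecutive_run_py v t) :
    find_consecutive_run_py v t = some [] := by
  unfold find_consecutive_run_py
  rw [if_neg (by omega)]
  rw [findLoopA_eq' v t _ (by omega)]
  by_cases h0 : (v.length : Int) + t ≤ 0 ∨ t = 0
  · -- the very first window values[0:t] is already empty
    have hcl : PySem.List.clampIdx v.length t = 0 := by
      simp only [PySem.List.clampIdx]
      split_ifs <;> omega
    rw [PySem.List.pyRange_one_cons (by omega)]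
    rw [List.find?_cons_of_pos (by
      show is_consecutive_py (PySem.List.slice v (some (0:Int)) (some ((0:Int) + t))) = true
      rw [show (0:Int) + t = t from by omega, slice_empty_of_clamp_zero v 0 t hcl]
      rfl)]
    simp only [Option.map_some]
    rw [show (0:Int) + t = t from by omega, slice_empty_of_clamp_zero v 0 t hcl]
  · -- t < 0 and len + t ≥ 1: every window before -t fails (¬D_), the window at -t is empty
    have htneg' : t < 0 := by omega
    have hpos' : 0 < (v.length : Int) + t := by omega
    rw [PySem.List.pyRange_one_append 0 (-t) ((v.length : Int) - t + 1) (by omega) (by omega)]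
    rw [List.find?_append]
    have hfst : (PySem.List.pyRange 0 (-t) 1).find?
        (fun i => is_consecutive_py (PySem.List.slice v (some i) (some (i + t)))) = none := by
      rw [List.find?_eq_none]
      intro x hxmem
      rw [PySem.List.mem_pyRange_one] at hxmem
      obtain ⟨x', rfl⟩ : ∃ x' : Nat, x = (x' : Int) := ⟨x.toNat, by omega⟩
      have hx' : x' < (-t).toNat := by omega
      rw [slice_neg_stop v t x' htneg' hpos' hx']
      rw [Bool.not_eq_true, ← Bool.not_eq_true]
      intro hc
      have hWx : Wb v x' (((v.length : Int) + t).toNat) :=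
        (bridge v x' (((v.length : Int) + t).toNat) (by omega)).mp hc
      apply hD
      exact ⟨htneg', by omega, x', by omega,
        (isChain_window_iff v x' (((v.length : Int) + t).toNat) (by omega)).mpr hWx⟩
    rw [hfst, Option.none_or]
    have hcl0 : PySem.List.clampIdx v.length (-t + t) = 0 := by
      simp only [PySem.List.clampIdx]
      split_ifs <;> omega
    rw [PySem.List.pyRange_one_cons (by omega)]
    rw [List.find?_cons_of_pos (by
      show is_consecutive_py (PySem.List.slice v (some (-t)) (some (-t + t))) = true
      rw [slice_empty_of_clamp_zero v (-t) (-t + t) hcl0]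
      rfl)]
    simp only [Option.map_some]
    rw [slice_empty_of_clamp_zero v (-t) (-t + t) hcl0]

-- ===== VERDICT (by name: the statement is the Claim_ definition above) =====
theorem find_consecutive_run_py_spec : Claim_unchanged_find_consecutive_run_py := by
  intro v t _ hD
  by_cases ht : t ≤ 0
  · rw [main_nonpos v t ht hD]
    simp [find_consecutive_run_py_alt, ht]
  · have hc : t = ((t.toNat : Nat) : Int) := by omega
    rw [hc, main_pos v t.toNat (by omega)]

theorem find_consecutive_run_py_changed : Claim_changed_find_consecutive_run_py := by
  unfold Claim_changed_find_consecutive_run_py; decide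

theorem find_consecutive_run_py_tight : Claim_exact_find_consecutive_run_py := by
  intro v t _ hD
  obtain ⟨htneg, hpos, i, hi, hWi⟩ := hD
  have hBval : find_consecutive_run_py_alt v t = some [] := by
    unfold find_consecutive_run_py_alt
    rw [if_pos (by omega)]
  rw [hBval]
  unfold find_consecutive_run_py
  rw [if_neg (by omega)]
  rw [findLoopA_eq' v t _ (by omega)]
  rw [show ((v.length : Int) - t + 1) = ((((v.length : Int) - t + 1).toNat : Nat) : Int) from by omega]
  rw [PySem.List.pyRange_one]
  rw [show (((((v.length : Int) - t + 1).toNat : Nat) : Int) - 0).toNat = ((v.length : Int) - t + 1).toNat from by omega]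
  rw [List.find?_map, Option.map_map]
  simp only [Function.comp_def, zero_add]
  set c := ((v.length : Int) + t).toNat with hc
  have hWb : Wb v i c := (isChain_window_iff v i c (by omega)).mp hWi
  have hip : is_consecutive_py (PySem.List.slice v (some (i : Int)) (some ((i : Int) + t))) = true := by
    rw [slice_neg_stop v t i (by omega) (by omega) (by omega)]
    exact (bridge v i c (by omega)).mpr hWb
  cases hfind : (List.range (((v.length : Int)) - t + 1).toNat).find?
      (fun x : Nat => is_consecutive_py (PySem.List.slice v (some (x : Int)) (some ((x : Int) + t)))) with
  | none =>
    exact absurd hip (List.find?_eq_none.mp hfind i (by simp only [List.mem_range]; omega))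
  | some x =>
    obtain ⟨hx1, hx2, hx3⟩ := find?_range_some.mp hfind
    have hxi : x ≤ i := by
      by_contra hgt
      have hfalse := hx3 i (by omega)
      simp [hip] at hfalse
    have hxlt : x < (-t).toNat := by omega
    simp only [Option.map_some]
    rw [slice_neg_stop v t x (by omega) (by omega) hxlt]
    intro hcontra
    have hemp : ((v.drop x).take c) = [] := by
      injection hcontra
    have hlen := window_len v x c (by omega)
    rw [hemp] at hlen
    simp at hlen
    omega
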